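-- pv_equiv track=rewrite | github.com/agatalenz/ALK | 12.py | GetSortedEdges
-- ===== SOURCE A (Python) =====
-- def GetRank(e, G):
--     return G[e[0]][e[1]]
--
-- def GetEdges(G):
--
--     E = []
--
--     for key in G.keys():
--         for destination, cost in G[key].items():
--             x = (key, destination)
--
--             if not E.__contains__((destination, key)):
--                 E.append(x)
--
--     return E
--
-- def GetSortedEdges(G):
--
--     Edges = GetEdges(G)
--     E = []
--     ranks = []
--
--     for e in Edges:
--         rank = GetRank(e, G)
--         if not ranks.__contains__(rank):
--             ranks.append(rank)
--
--     ranks.sort()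
--
--     for rank in ranks:
--         for e in Edges:
--             if GetRank(e, G) == rank:
--                 E.append(e)
--
--     return E
-- ===== SOURCE B (Python) =====
-- def GetRank(e, G):
--     return G[e[0]][e[1]]
--
-- def GetEdges(G):
--     E = []
--     seen = set()
--     for key in G.keys():
--         for destination, cost in G[key].items():
--             x = (key, destination)
--             if (destination, key) not in seen:
--                 E.append(x)
--                 seen.add(x)
--     return E
--
-- def GetSortedEdges(G):
--     Edges = GetEdges(G)
--     buckets = {}
--     for e in Edges:
--         buckets.setdefault(GetRank(e, G), []).append(e)
--     E = []
--     for rank in sorted(buckets):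
--         E.extend(buckets[rank])
--     return E
-- ===== Notes on version B (the rewrite author's own statement) =====
-- stated objective: faster
-- what changed: B collects edges with a seen-set instead of rescanning the output list for the reverse edge, and sorts by making one grouping pass into a rank-keyed dict and concatenating buckets over the sorted keys, instead of collecting distinct ranks and rescanning the whole edge list once per distinct rank.
import Mathlib
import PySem

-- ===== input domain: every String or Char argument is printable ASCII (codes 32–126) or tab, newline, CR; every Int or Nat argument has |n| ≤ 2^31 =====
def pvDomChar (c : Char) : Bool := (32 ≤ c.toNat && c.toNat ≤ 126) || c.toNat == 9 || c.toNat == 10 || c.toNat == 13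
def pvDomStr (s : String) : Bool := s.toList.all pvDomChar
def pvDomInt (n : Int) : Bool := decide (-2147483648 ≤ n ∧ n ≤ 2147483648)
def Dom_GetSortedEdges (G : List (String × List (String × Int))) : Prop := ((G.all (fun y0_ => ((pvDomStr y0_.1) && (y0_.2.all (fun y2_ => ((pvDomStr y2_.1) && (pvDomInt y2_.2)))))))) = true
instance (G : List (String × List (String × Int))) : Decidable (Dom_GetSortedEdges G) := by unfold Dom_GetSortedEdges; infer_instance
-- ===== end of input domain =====

-- B replaces A's per-distinct-rank full rescans of the edge list by one grouping pass into a
-- rank-keyed dict followed by concatenation over the sorted keys, and B's GetEdges keeps a set of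
-- the edges collected so far instead of rescanning the output list for the reverse edge.
-- Note: the dict G is modelled as an association list; lookups are first-match. The `.getD` defaults
-- below are never reached on inputs denoting a Python dict (every looked-up key is present).

-- ===== PORT A =====
-- GetRank(e, G) = G[e[0]][e[1]]
def pvGetRank (e : String × String) (G : List (String × List (String × Int))) : Int :=
  (((G.lookup e.1).getD []).lookup e.2).getD 0

-- GetEdges(G): for key in G.keys(): for destination, cost in G[key].items(): append (key, destination) unless (destination, key) already collected
def pvGetEdges (G : List (String × List (String × Int))) : List (String × String) :=
  G.foldl (fun E kv =>
    ((G.lookup kv.1).getD []).foldl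
      (fun E dc => if E.contains (dc.1, kv.1) then E else E ++ [(kv.1, dc.1)]) E) []

def GetSortedEdges (G : List (String × List (String × Int))) : List (String × String) :=
  let Edges := pvGetEdges G
  let ranks := Edges.foldl (fun rs e =>
    let rank := pvGetRank e G
    if rs.contains rank then rs else rs ++ [rank]) ([] : List Int)
  let ranksSorted := PySem.List.sorted ranks (fun r => r) false   -- ranks.sort()
  ranksSorted.foldl (fun E rank =>
    Edges.foldl (fun E e => if pvGetRank e G == rank then E ++ [e] else E) E) []

-- ===== PORT B =====
-- B's GetEdges: same traversal, but the reverse-edge membership test goes to a set `seen`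
-- that mirrors the collected list E (E.append(x) / seen.add(x) happen together)
def pvGetEdgesAlt (G : List (String × List (String × Int))) : List (String × String) :=
  (G.foldl (fun st kv =>
      ((G.lookup kv.1).getD []).foldl
        (fun st dc => if st.2.contains (dc.1, kv.1) then st
          else (st.1 ++ [(kv.1, dc.1)], PySem.Set.add st.2 (kv.1, dc.1)))
        st)
    (([], PySem.Set.empty) : List (String × String) × PySem.Set (String × String))).1

def GetSortedEdges_alt (G : List (String × List (String × Int))) : List (String × String) :=
  let Edges := pvGetEdgesAlt G
  -- buckets.setdefault(GetRank(e, G), []).append(e)  ==  buckets[r] = buckets.get(r, []) + [e]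
  let buckets := Edges.foldl (fun d e => d.modify (pvGetRank e G) [] (fun l => l ++ [e]))
    (PySem.Dict.empty : PySem.Dict Int (List (String × String)))
  (PySem.List.sorted buckets.keys (fun r => r) false).foldl
    (fun E rank => E ++ buckets.getD rank []) []

-- ===== PRECONDITION & SPEC =====
def Spec_GetSortedEdges (G : List (String × List (String × Int))) (out : List (String × String)) : Prop := out = GetSortedEdges_alt G
instance (G : List (String × List (String × Int))) (out : List (String × String)) : Decidable (Spec_GetSortedEdges G out) := by unfold Spec_GetSortedEdges; infer_instance

-- ===== CLAIM (what is proved, stated in full; the proofs are below) =====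
def Claim_equal_GetSortedEdges : Prop := ∀ (G : List (String × List (String × Int))), Dom_GetSortedEdges G → Spec_GetSortedEdges G (GetSortedEdges G)

-- ===== LEMMAS AND PROOFS =====

lemma ofList_contains_eq {α : Type} [BEq α] [LawfulBEq α] (E : List α) (y : α) :
    (PySem.Set.ofList E).contains y = E.contains y := by
  simp [PySem.Set.contains]

lemma ofList_append_singleton {α : Type} [BEq α] (E : List α) (x : α) :
    PySem.Set.ofList (E ++ [x]) = PySem.Set.add (PySem.Set.ofList E) x := by
  simp [PySem.Set.ofList, List.foldl_append]

-- B's seen-set always mirrors the collected edge list, so the two GetEdges agree (inner loop)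
lemma edges_inner_sim (k : String) (l : List (String × Int)) (E : List (String × String)) :
    l.foldl (fun st dc => if st.2.contains (dc.1, k) then st
        else (st.1 ++ [(k, dc.1)], PySem.Set.add st.2 (k, dc.1))) (E, PySem.Set.ofList E)
      = (l.foldl (fun E dc => if E.contains (dc.1, k) then E else E ++ [(k, dc.1)]) E,
         PySem.Set.ofList (l.foldl (fun E dc => if E.contains (dc.1, k) then E else E ++ [(k, dc.1)]) E)) := by
  induction l generalizing E with
  | nil => rfl
  | cons dc t ih =>
    simp only [List.foldl_cons, ofList_contains_eq]
    by_cases hc : E.contains (dc.1, k) = true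
    · simp only [hc, if_true]
      exact ih E
    · simp only [hc, if_false, Bool.false_eq_true, ← ofList_append_singleton]
      exact ih (E ++ [(k, dc.1)])

-- …and hence over the whole graph
lemma getEdgesAlt_eq (G : List (String × List (String × Int))) :
    pvGetEdgesAlt G = pvGetEdges G := by
  unfold pvGetEdgesAlt pvGetEdges
  suffices h : ∀ (Gs : List (String × List (String × Int))) (E : List (String × String)),
      Gs.foldl (fun st kv =>
        ((G.lookup kv.1).getD []).foldl
          (fun st dc => if st.2.contains (dc.1, kv.1) then st
            else (st.1 ++ [(kv.1, dc.1)], PySem.Set.add st.2 (kv.1, dc.1)))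
          st) (E, PySem.Set.ofList E)
      = (Gs.foldl (fun E kv =>
          ((G.lookup kv.1).getD []).foldl
            (fun E dc => if E.contains (dc.1, kv.1) then E else E ++ [(kv.1, dc.1)]) E) E,
         PySem.Set.ofList (Gs.foldl (fun E kv =>
          ((G.lookup kv.1).getD []).foldl
            (fun E dc => if E.contains (dc.1, kv.1) then E else E ++ [(kv.1, dc.1)]) E) E)) by
    have := h G []
    simp only [show (PySem.Set.ofList ([] : List (String × String))) = PySem.Set.empty from rfl] at this
    rw [this]
  intro Gs
  induction Gs with
  | nil => intro E; rfl
  | cons kv t ih =>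
    intro E
    simp only [List.foldl_cons, edges_inner_sim]
    exact ih _

-- A's distinct-rank list equals B's bucket-key list (both are the ranks in first-occurrence order).
lemma ranks_eq_keys (Edges : List (String × String)) (f : String × String → Int) :
    Edges.foldl (fun rs e => let rank := f e; if rs.contains rank then rs else rs ++ [rank]) ([] : List Int)
      = (Edges.foldl (fun d e => d.modify (f e) [] (fun l => l ++ [e]))
          (PySem.Dict.empty : PySem.Dict Int (List (String × String)))).keys := by
  rw [PySem.Dict.keys_foldl_modify_key, PySem.Dict.keys_empty, PySem.Set.update_nil_left,
    PySem.Set.ofList_eq_foldl, List.foldl_map]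
  simp [PySem.Set.add]

-- B's bucket for a rank is exactly the sublist of Edges with that rank (A's inner rescan result).
lemma bucket_eq_filter (Edges : List (String × String)) (f : String × String → Int) (r : Int) :
    (Edges.foldl (fun d e => d.modify (f e) [] (fun l => l ++ [e]))
        (PySem.Dict.empty : PySem.Dict Int (List (String × String)))).getD r []
      = Edges.filter (fun e => f e == r) := by
  have h : Edges.foldl (fun d e => d.modify (f e) [] (fun l => l ++ [e]))
      (PySem.Dict.empty : PySem.Dict Int (List (String × String)))
      = (Edges.map (fun e => (f e, e))).foldl (fun d p => d.modify p.1 [] (fun l => l ++ [p.2]))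
        PySem.Dict.empty := by
    rw [List.foldl_map]
  rw [h, PySem.Dict.getD_foldl_modify_append, PySem.Dict.getD_empty, List.nil_append,
    List.filter_map, List.map_map]
  simp [Function.comp_def]

-- the two programs agree for ANY edge list and rank function
lemma sorted_buckets_eq (Edges : List (String × String)) (f : String × String → Int) :
    (PySem.List.sorted
        (Edges.foldl (fun rs e => let rank := f e; if rs.contains rank then rs else rs ++ [rank]) ([] : List Int))
        (fun r => r) false).foldl
      (fun E rank => Edges.foldl (fun E e => if f e == rank then E ++ [e] else E) E) []
    = (PySem.List.sorted
        (Edges.foldl (fun d e => d.modify (f e) [] (fun l => l ++ [e]))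
          (PySem.Dict.empty : PySem.Dict Int (List (String × String)))).keys
        (fun r => r) false).foldl
      (fun E rank => E ++ (Edges.foldl (fun d e => d.modify (f e) [] (fun l => l ++ [e]))
          (PySem.Dict.empty : PySem.Dict Int (List (String × String)))).getD rank []) [] := by
  rw [ranks_eq_keys]
  apply PySem.List.foldl_congr_mem
  intro E r _
  rw [bucket_eq_filter]
  have := PySem.List.foldl_append_if (l := Edges) (p := fun e => f e == r) (f := fun e => e) (acc := E)
  simpa using this

-- ===== VERDICT (by name: the statement is the Claim_ definition above) =====
theorem GetSortedEdges_spec : Claim_equal_GetSortedEdges := by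
  intro G _
  unfold Spec_GetSortedEdges GetSortedEdges GetSortedEdges_alt
  rw [getEdgesAlt_eq]
  exact sorted_buckets_eq (pvGetEdges G) (fun e => pvGetRank e G)
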